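-- pv_equiv track=rewrite | github.com/Rudra1234n/Daily_DSA_Questions | Coding_Challenge/q146.py | check
-- ===== SOURCE A (Python) =====
-- def check(freq):
--     n = -1
--     for f in freq:
--         if f > 0:
--             if n == -1:
--                 n = f
--             elif f != n:
--                 return False
--     return True
-- ===== SOURCE B (Python) =====
-- def check(freq):
--     pos = [f for f in freq if f > 0]
--     return not pos or min(pos) == max(pos)
-- ===== Notes on version B (the rewrite author's own statement) =====
-- stated objective: idiomatic
-- what changed: Replaced the sentinel-carrying single pass with early return by staged passes: filter the positive values, then compare their extrema (min == max) to decide whether all positive frequencies coincide.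
import Mathlib
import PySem

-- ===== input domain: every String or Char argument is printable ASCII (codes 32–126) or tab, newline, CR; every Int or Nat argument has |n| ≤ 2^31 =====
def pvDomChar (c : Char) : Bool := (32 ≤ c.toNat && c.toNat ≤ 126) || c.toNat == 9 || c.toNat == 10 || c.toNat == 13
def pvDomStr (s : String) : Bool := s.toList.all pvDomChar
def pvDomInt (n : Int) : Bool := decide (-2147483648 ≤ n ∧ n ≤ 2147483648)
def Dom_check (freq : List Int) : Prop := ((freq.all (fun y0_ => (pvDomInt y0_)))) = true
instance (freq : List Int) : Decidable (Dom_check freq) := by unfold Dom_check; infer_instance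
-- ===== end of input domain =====

-- B replaces A's sentinel loop with staged passes: filter the positives, then compare their extrema (min == max); objective: more idiomatic.

-- ===== PORT A =====
-- the for-loop of A with its running sentinel n and early 'return False'
def checkLoop : Int → List Int → Bool
  | _, [] => true
  | n, f :: rest =>
    if f > 0 then
      if n == -1 then checkLoop f rest
      else if f != n then false
      else checkLoop n rest
    else checkLoop n rest

def check (freq : List Int) : Bool := checkLoop (-1) freq

-- ===== PORT B =====
def check_alt (freq : List Int) : Bool :=
  let pos := freq.filter (fun f => decide (f > 0))
  pos == [] || (PySem.List.min? pos (fun x => x) == PySem.List.max? pos (fun x => x))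

-- ===== PRECONDITION & SPEC =====
def Spec_check (freq : List Int) (out : Bool) : Prop := out = check_alt freq
instance (freq : List Int) (out : Bool) : Decidable (Spec_check freq out) := by unfold Spec_check; infer_instance

-- ===== CLAIM (what is proved, stated in full; the proofs are below) =====
def Claim_equal_check : Prop := ∀ (freq : List Int), Dom_check freq → Spec_check freq (check freq)

-- ===== LEMMAS AND PROOFS =====

theorem foldl_min_eq_max_iff (rest : List Int) (f : Int) :
    (rest.foldl min f = rest.foldl max f) ↔ rest.all (· == f) := by
  constructor
  · intro h
    have hmin := PySem.List.foldl_min_le rest f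
    have hmax := PySem.List.le_foldl_max rest f
    have hf : rest.foldl min f = f := le_antisymm hmin.1 (h ▸ hmax.1)
    rw [List.all_eq_true]
    intro y hy
    have h1 := hmin.2 y hy
    have h2 := hmax.2 y hy
    simp only [beq_iff_eq]
    omega
  · intro h
    rw [List.all_eq_true] at h
    induction rest with
    | nil => rfl
    | cons x r ih =>
      have hx : x = f := by simpa using h x (by simp)
      simp only [List.foldl, hx, min_self, max_self]
      exact ih (fun y hy => h y (by simp [hy]))

theorem check_alt_eq (freq : List Int) :
    check_alt freq
      = match freq.filter (fun f => decide (f > 0)) with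
        | [] => true
        | f :: rest => rest.all (· == f) := by
  unfold check_alt
  cases h : freq.filter (fun f => decide (f > 0)) with
  | nil => simp
  | cons f rest =>
    simp only [PySem.List.min?_id_cons, PySem.List.max?_id_cons]
    rw [Bool.eq_iff_iff]
    simp only [Bool.or_eq_true, beq_iff_eq, reduceCtorEq, Option.some.injEq, false_or]
    rw [foldl_min_eq_max_iff rest f]

theorem checkLoop_pos (l : List Int) (n : Int) (hn : 0 < n) :
    checkLoop n l = (l.filter (fun f => decide (f > 0))).all (· == n) := by
  induction l with
  | nil => simp [checkLoop]
  | cons f rest ih =>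
    by_cases hf : f > 0
    · have hne : (n == -1) = false := by
        rw [beq_eq_false_iff_ne]; omega
      by_cases hfn : f = n
      · subst hfn
        simp [checkLoop, hf, hne, ih]
      · have : (f != n) = true := by simp [bne, hfn]
        simp [checkLoop, hf, hne, this, hfn]
    · simp [checkLoop, hf, ih]

theorem check_eq_aux (freq : List Int) : check freq = check_alt freq := by
  unfold check
  rw [check_alt_eq]
  induction freq with
  | nil => simp [checkLoop]
  | cons f rest ih =>
    by_cases hf : f > 0
    · have : ((-1 : Int) == -1) = true := by simp
      simp only [checkLoop, this, if_true, List.filter_cons, hf]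
      simp only [decide_true]
      rw [checkLoop_pos rest f hf]
      simp
    · simp only [checkLoop, if_neg hf, List.filter_cons]
      simpa [hf] using ih

-- ===== VERDICT (by name: the statement is the Claim_ definition above) =====
theorem check_spec : Claim_equal_check := by
  intro freq _
  exact check_eq_aux freq
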